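-- pv_equiv track=rewrite | github.com/eqSIM/Test-RSP-SGP22 | scripts/gen_figures.py | hex_rows
-- ===== SOURCE A (Python) =====
-- def hex_rows(apdu_hex: str, key_hex: str, bytes_per_row: int) -> tuple[list[str], int, int]:
--     """Return rows of 'offset  hex...', and start/end byte indices of key in apdu_hex (hex string)."""
--     h = apdu_hex.strip().lower()
--     kh = key_hex.strip().lower()
--     start = h.find(kh)
--     if start < 0 or start % 2:
--         raise ValueError("key hex not found in APDU hex")
--     start_b = start // 2
--     end_b = start_b + len(kh) // 2
--     rows: list[str] = []
--     for off in range(0, len(h), bytes_per_row * 2):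
--         chunk = h[off : off + bytes_per_row * 2]
--         spaced = " ".join(chunk[i : i + 2] for i in range(0, len(chunk), 2))
--         rows.append(f"{off // 2:04x}  {spaced}")
--     return rows, start_b, end_b
-- ===== SOURCE B (Python) =====
-- def hex_rows(apdu_hex: str, key_hex: str, bytes_per_row: int) -> tuple[list[str], int, int]:
--     """Tokenize the hex into 2-char byte tokens once, then emit rows as slices of the
--     token list; the row label is simply the first token's index (= byte offset)."""
--     h = apdu_hex.strip().lower()
--     kh = key_hex.strip().lower()
--     start = h.find(kh)
--     if start < 0 or start % 2:
--         raise ValueError("key hex not found in APDU hex")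
--     tokens = [h[i:i + 2] for i in range(0, len(h), 2)]
--     rows = [f"{i:04x}  {' '.join(tokens[i:i + bytes_per_row])}"
--             for i in range(0, len(tokens), bytes_per_row)]
--     return rows, start // 2, start // 2 + len(kh) // 2
-- ===== Notes on version B (the rewrite author's own statement) =====
-- stated objective: simpler
-- what changed: B tokenizes the hex string once into 2-char byte tokens and builds each row as a joined slice of that token list labelled by the token index itself, instead of A's per-row character slicing, inner re-splitting loop and offset//2 arithmetic.
import Mathlib
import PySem

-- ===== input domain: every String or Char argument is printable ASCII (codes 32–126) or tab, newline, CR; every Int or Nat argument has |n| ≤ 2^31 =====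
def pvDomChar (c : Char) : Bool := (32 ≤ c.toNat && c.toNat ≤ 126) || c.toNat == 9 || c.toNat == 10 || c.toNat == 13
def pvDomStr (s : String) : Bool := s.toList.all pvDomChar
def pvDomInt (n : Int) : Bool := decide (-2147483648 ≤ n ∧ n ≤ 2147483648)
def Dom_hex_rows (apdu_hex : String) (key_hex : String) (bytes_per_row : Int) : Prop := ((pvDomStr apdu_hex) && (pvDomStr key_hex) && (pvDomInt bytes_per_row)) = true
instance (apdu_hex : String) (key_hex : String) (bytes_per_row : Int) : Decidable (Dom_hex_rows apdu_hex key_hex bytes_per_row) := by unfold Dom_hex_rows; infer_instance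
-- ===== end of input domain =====

-- B tokenizes the hex into 2-char byte tokens once and emits rows as slices of the token
-- list labelled by the token index itself (objective: simpler — the inner per-chunk
-- re-splitting and the offset division disappear).

-- f"{n:04x}" (exact for the nonnegative offsets the two programs format)
def pyHex4 (n : Int) : String :=
  let ds := Nat.toDigits 16 n.toNat
  String.ofList (List.replicate (4 - ds.length) '0' ++ ds)

-- ===== PORT A =====
-- one row of A's loop: chunk = h[off : off+bytes_per_row*2], re-split into 2-char pieces
def pvRowA (h : String) (bpr : Int) (off : Int) : String :=
  let chunk := PySem.Str.slice h (some off) (some (off + bpr * 2))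
  let spaced := PySem.Str.join " " ((PySem.List.pyRange 0 (PySem.Str.len chunk) 2).map
      (fun i => PySem.Str.slice chunk (some i) (some (i + 2))))
  pyHex4 (PySem.Int.floordiv off 2) ++ "  " ++ spaced

def hex_rows (apdu_hex : String) (key_hex : String) (bytes_per_row : Int) : List String × Int × Int :=
  let h := PySem.Str.lower (PySem.Str.strip apdu_hex)
  let kh := PySem.Str.lower (PySem.Str.strip key_hex)
  let start := PySem.Str.find h kh
  if start < 0 ∨ PySem.Int.mod start 2 ≠ 0 then
    ([], 0, 0)  -- Python raises ValueError here (and at range step 0); excluded by Pre_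
  else
    let start_b := PySem.Int.floordiv start 2
    let end_b := start_b + PySem.Int.floordiv (PySem.Str.len kh) 2
    ((PySem.List.pyRange 0 (PySem.Str.len h) (bytes_per_row * 2)).map (pvRowA h bytes_per_row),
     start_b, end_b)

-- ===== PORT B =====
-- tokens = [h[i:i+2] for i in range(0, len(h), 2)]
def pvTokens (h : String) : List String :=
  (PySem.List.pyRange 0 (PySem.Str.len h) 2).map
    (fun i => PySem.Str.slice h (some i) (some (i + 2)))

-- one row of B: f"{i:04x}  {' '.join(tokens[i:i+bytes_per_row])}"
def pvRowB (tokens : List String) (bpr : Int) (i : Int) : String :=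
  pyHex4 i ++ "  " ++ PySem.Str.join " " (PySem.List.slice tokens (some i) (some (i + bpr)))

def hex_rows_alt (apdu_hex : String) (key_hex : String) (bytes_per_row : Int) : List String × Int × Int :=
  let h := PySem.Str.lower (PySem.Str.strip apdu_hex)
  let kh := PySem.Str.lower (PySem.Str.strip key_hex)
  let start := PySem.Str.find h kh
  if start < 0 ∨ PySem.Int.mod start 2 ≠ 0 then
    ([], 0, 0)  -- Python raises ValueError here (and at range step 0); excluded by Pre_
  else
    let tokens := pvTokens h
    ((PySem.List.pyRange 0 ((tokens.length : Int)) bytes_per_row).map (pvRowB tokens bytes_per_row),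
     PySem.Int.floordiv start 2,
     PySem.Int.floordiv start 2 + PySem.Int.floordiv (PySem.Str.len kh) 2)

-- ===== PRECONDITION & SPEC =====
-- Pre_ excludes exactly the inputs where A raises ValueError: the stripped/lowercased key
-- not found at an even offset of the stripped/lowercased hex, or bytes_per_row = 0 (range step 0).
def Pre_hex_rows (apdu_hex : String) (key_hex : String) (bytes_per_row : Int) : Prop :=
  0 ≤ PySem.Str.find (PySem.Str.lower (PySem.Str.strip apdu_hex)) (PySem.Str.lower (PySem.Str.strip key_hex)) ∧
  PySem.Int.mod (PySem.Str.find (PySem.Str.lower (PySem.Str.strip apdu_hex)) (PySem.Str.lower (PySem.Str.strip key_hex))) 2 = 0 ∧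
  bytes_per_row ≠ 0

instance (apdu_hex : String) (key_hex : String) (bytes_per_row : Int) : Decidable (Pre_hex_rows apdu_hex key_hex bytes_per_row) := by unfold Pre_hex_rows; infer_instance

def pvWitness_hex_rows : String × String × Int := ("3a4b", "4b", 1)

def Spec_hex_rows (apdu_hex : String) (key_hex : String) (bytes_per_row : Int) (out : List String × Int × Int) : Prop := out = hex_rows_alt apdu_hex key_hex bytes_per_row
instance (apdu_hex : String) (key_hex : String) (bytes_per_row : Int) (out : List String × Int × Int) : Decidable (Spec_hex_rows apdu_hex key_hex bytes_per_row out) := by unfold Spec_hex_rows; infer_instance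

-- ===== CLAIM (what is proved, stated in full; the proofs are below) =====
def Claim_equal_hex_rows : Prop := ∀ (apdu_hex : String) (key_hex : String) (bytes_per_row : Int), Dom_hex_rows apdu_hex key_hex bytes_per_row → Pre_hex_rows apdu_hex key_hex bytes_per_row → Spec_hex_rows apdu_hex key_hex bytes_per_row (hex_rows apdu_hex key_hex bytes_per_row)

-- ===== LEMMAS AND PROOFS =====

theorem pv_pyRange_neg_nil (stop s : Int) (hs : s < 0) (h0 : 0 ≤ stop) :
    PySem.List.pyRange 0 stop s = [] := by
  simp only [PySem.List.pyRange]
  split_ifs <;> simp_all <;> omega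

theorem pv_take_range' (s c m : Nat) : (List.range' s c).take m = List.range' s (min m c) := by
  induction c generalizing s m with
  | zero => simp
  | succ c ih =>
    cases m with
    | zero => simp
    | succ m => simp [List.range'_succ, ih, Nat.succ_min_succ]

theorem pv_drop_range (m T : Nat) : (List.range T).drop m = List.range' m (T - m) := by
  simp [List.range_eq_range', List.drop_range']

-- length of (pyRange 0 L 2) is ceil(L/2)
theorem pv_pyRange_two (L : Nat) :
    PySem.List.pyRange 0 (L : Int) 2 = (List.range ((L + 1) / 2)).map (fun j => ((2 * j : Nat) : Int)) := by
  rw [PySem.List.pyRange_of_pos 0 (L : Int) (by norm_num)]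
  have hc : (if (0:Int) < (L:Int) then (((L:Int) - 0 + 2 - 1) / 2).toNat else 0) = (L + 1) / 2 := by
    split_ifs with h
    · have h1 : ((L:Int) - 0 + 2 - 1) = ((L + 1 : Nat) : Int) := by push_cast; ring
      rw [h1]
      omega
    · omega
  rw [hc]
  apply List.map_congr_left
  intro k _
  push_cast; ring

theorem pv_tokens_eq (h : String) :
    pvTokens h = (List.range ((h.toList.length + 1) / 2)).map
      (fun j => PySem.Str.slice h (some ((2 * j : Nat) : Int)) (some (((2 * j : Nat) : Int) + 2))) := by
  unfold pvTokens
  rw [PySem.Str.len_eq, pv_pyRange_two, List.map_map]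
  rfl

theorem pv_tokens_len (h : String) : (pvTokens h).length = (h.toList.length + 1) / 2 := by
  rw [pv_tokens_eq]; simp

-- Nat ceiling-division identity behind the equal row counts
theorem pv_ceil2 (L n : Nat) (hn : 0 < n) : (L + 2 * n - 1) / (2 * n) = ((L + 1) / 2 + n - 1) / n := by
  have h1 : (L + 2 * n - 1) / (2 * n) = (L + 2 * n - 1) / 2 / n := by
    rw [Nat.div_div_eq_div_mul]
  have h2 : (L + 2 * n - 1) / 2 = (L + 1) / 2 + n - 1 := by omega
  rw [h1, h2]

theorem pv_str_slice_nat (s : String) (a c : Nat) :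
    PySem.Str.slice s (some (a:Int)) (some ((a:Int)+(c:Int))) = String.ofList ((s.toList.drop a).take c) := by
  simp [PySem.Str.slice, PySem.Chars.slice, PySem.List.slice_natCast_add]

theorem pv_str_slice_two (s : String) (a : Nat) :
    PySem.Str.slice s (some (a:Int)) (some ((a:Int)+2)) = String.ofList ((s.toList.drop a).take 2) := by
  have h : ((a:Int)+2) = ((a:Int)+((2:Nat):Int)) := by norm_num
  rw [h, pv_str_slice_nat]

-- token m+j of h is token j of chunk m (char-list level)
theorem pv_chunk_tok (cs : List Char) (n m j : Nat) (hj : j < n) :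
    (cs.drop (2*(m+j))).take 2 = (((cs.drop (2*m)).take (2*n)).drop (2*j)).take 2 := by
  have h1 : 2*m + 2*j = 2*(m+j) := by ring
  have h2 : min 2 (2*n - 2*j) = 2 := by omega
  rw [List.drop_take, List.drop_drop, List.take_take, h1, h2]

-- the inner lists agree: chunk m re-split into 2-char pieces = tokens[m : m+n]
theorem pv_inner_eq (h : String) (n m : Nat) (hm : m < (h.toList.length + 1) / 2) :
    (PySem.List.pyRange 0 (PySem.Str.len (PySem.Str.slice h (some ((2*m:Nat):Int)) (some (((2*m:Nat):Int) + (n:Int) * 2)))) 2).map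
      (fun i => PySem.Str.slice (PySem.Str.slice h (some ((2*m:Nat):Int)) (some (((2*m:Nat):Int) + (n:Int) * 2))) (some i) (some (i + 2)))
    = PySem.List.slice (pvTokens h) (some ((m:Nat):Int)) (some (((m:Nat):Int) + (n:Int))) := by
  have hc : ((2*m:Nat):Int) + (n:Int) * 2 = ((2*m:Nat):Int) + ((2*n:Nat):Int) := by push_cast; ring
  rw [hc, pv_str_slice_nat, PySem.List.slice_natCast_add, pv_tokens_eq]
  rw [PySem.Str.len_eq, String.toList_ofList, pv_pyRange_two, List.map_map]
  rw [← List.map_drop, ← List.map_take, pv_drop_range, pv_take_range', List.range'_eq_map_range, List.map_map]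
  have hlen : ((h.toList.drop (2*m)).take (2*n)).length = min (2*n) (h.toList.length - 2*m) := by simp
  have h2m : 2*m ≤ h.toList.length := by omega
  have hTcK : (((h.toList.drop (2*m)).take (2*n)).length + 1) / 2
      = min n ((h.toList.length + 1) / 2 - m) := by
    rw [hlen]; omega
  rw [hTcK]
  apply List.map_congr_left
  intro j hj
  have hjn : j < n := by
    have := List.mem_range.mp hj
    omega
  show PySem.Str.slice (String.ofList ((h.toList.drop (2*m)).take (2*n)))
        (some ((2*j:Nat):Int)) (some (((2*j:Nat):Int) + 2))
      = PySem.Str.slice h (some ((2*(m+j):Nat):Int)) (some (((2*(m+j):Nat):Int) + 2))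
  rw [pv_str_slice_two, pv_str_slice_two, String.toList_ofList]
  exact congrArg String.ofList (pv_chunk_tok h.toList n m j hjn).symm

theorem pv_count_pos (M k : Nat) (hk : 0 < k) :
    (if (0:Int) < (M:Int) then (((M:Int) - 0 + (k:Int) - 1) / (k:Int)).toNat else 0) = (M + k - 1) / k := by
  split_ifs with h
  · have h1 : ((M:Int) - 0 + (k:Int) - 1) = ((M + k - 1 : Nat) : Int) := by omega
    rw [h1, ← Int.natCast_ediv, Int.toNat_natCast]
  · have hM : M = 0 := by omega
    subst hM
    exact (Nat.div_eq_of_lt (by omega)).symm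

theorem pv_row_eq (h : String) (n m : Nat) (_hn : 0 < n) (hm : m < (h.toList.length + 1) / 2) :
    pvRowA h (n : Int) ((2 * m : Nat) : Int) = pvRowB (pvTokens h) (n : Int) ((m : Nat) : Int) := by
  have hhex : PySem.Int.floordiv ((2 * m : Nat) : Int) 2 = ((m : Nat) : Int) := by
    rw [PySem.Int.floordiv_eq_ediv_of_pos (by norm_num)]; omega
  simp only [pvRowA, pvRowB, hhex, pv_inner_eq h n m hm]

theorem pv_rows_eq (h : String) (b : Int) (hb : b ≠ 0) :
    (PySem.List.pyRange 0 (PySem.Str.len h) (b * 2)).map (pvRowA h b)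
      = (PySem.List.pyRange 0 (((pvTokens h).length : Int)) b).map (pvRowB (pvTokens h) b) := by
  rcases lt_or_gt_of_ne hb with hneg | hpos
  · rw [pv_pyRange_neg_nil _ _ (by omega) (by rw [PySem.Str.len_eq]; positivity),
        pv_pyRange_neg_nil _ _ hneg (by positivity)]
    rfl
  · obtain ⟨n, rfl⟩ : ∃ n : Nat, b = (n : Int) := ⟨b.toNat, (Int.toNat_of_nonneg hpos.le).symm⟩
    have hn : 0 < n := by exact_mod_cast hpos
    set L := h.toList.length with hL
    set T := (L + 1) / 2 with hT
    have hmul : ((n : Int) * 2) = ((2 * n : Nat) : Int) := by push_cast; ring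
    rw [PySem.Str.len_eq, pv_tokens_len, ← hL, ← hT,
        PySem.List.pyRange_of_pos 0 (L : Int) (by positivity),
        PySem.List.pyRange_of_pos 0 (T : Int) (by exact_mod_cast hn)]
    have hcA : (if (0:Int) < (L:Int) then (((L:Int) - 0 + (n:Int) * 2 - 1) / ((n:Int) * 2)).toNat else 0)
        = (T + n - 1) / n := by
      rw [hmul, pv_count_pos L (2 * n) (by omega), hT, pv_ceil2 L n hn]
    have hcB : (if (0:Int) < (T:Int) then (((T:Int) - 0 + (n:Int) - 1) / (n:Int)).toNat else 0)
        = (T + n - 1) / n := pv_count_pos T n hn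
    rw [hcA, hcB, List.map_map, List.map_map]
    apply List.map_congr_left
    intro k hk
    have hk' : k < (T + n - 1) / n := List.mem_range.mp hk
    have hnk : n * k < T := by
      by_contra hge
      have hTk : T + n - 1 ≤ n * k + (n - 1) := by omega
      have h1 : (T + n - 1) / n ≤ (n * k + (n - 1)) / n := Nat.div_le_div_right hTk
      rw [Nat.mul_add_div hn, Nat.div_eq_of_lt (show n - 1 < n by omega)] at h1
      omega
    have e1 : (0 : Int) + (n : Int) * 2 * (k : Int) = ((2 * (n * k) : Nat) : Int) := by push_cast; ring
    have e2 : (0 : Int) + (n : Int) * (k : Int) = ((n * k : Nat) : Int) := by push_cast; ring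
    show pvRowA h (n : Int) ((0 : Int) + (n : Int) * 2 * (k : Int))
        = pvRowB (pvTokens h) (n : Int) ((0 : Int) + (n : Int) * (k : Int))
    rw [e1, e2]
    exact pv_row_eq h n (n * k) hn hnk

theorem pv_eq_of_ne (apdu_hex key_hex : String) (b : Int) (hb : b ≠ 0) :
    hex_rows apdu_hex key_hex b = hex_rows_alt apdu_hex key_hex b := by
  by_cases hcond : (PySem.Str.find (PySem.Str.lower (PySem.Str.strip apdu_hex)) (PySem.Str.lower (PySem.Str.strip key_hex)) < 0 ∨
      PySem.Int.mod (PySem.Str.find (PySem.Str.lower (PySem.Str.strip apdu_hex)) (PySem.Str.lower (PySem.Str.strip key_hex))) 2 ≠ 0)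
  · simp only [hex_rows, hex_rows_alt, if_pos hcond]
  · simp only [hex_rows, hex_rows_alt, if_neg hcond, pv_rows_eq _ b hb]

-- ===== VERDICT (by name: the statement is the Claim_ definition above) =====
theorem hex_rows_spec : Claim_equal_hex_rows := by
  intro a k b _ hpre
  unfold Spec_hex_rows
  exact pv_eq_of_ne a k b hpre.2.2
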